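-- pv_equiv track=rewrite | github.com/K1DV5/schedule | server/algo.py | ectsRequiredForDivisions
-- ===== SOURCE A (Python) =====
-- def ectsRequiredForDivisions(ectsDiv, periods):
--     ectsSpaces = {}
--     for combos in ectsDiv.values():
--         for ects in combos:
--             ectsSpaces[ects] = ects  # after assigning, due to not being complementary
--     ectses = [int(ects) for ects in ectsSpaces.keys()]
--     for ects in ectses:
--         otherSpace = periods[0] - ects
--         lefts = [otherSpace - other for other in ectses if otherSpace >= other]
--         if lefts:
--             ectsSpaces[ects] = min(lefts) + ects
--     return ectsSpaces
-- ===== SOURCE B (Python) =====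
-- def ectsRequiredForDivisions(ectsDiv, periods):
--     # distinct ects values, first occurrence order
--     order = list(dict.fromkeys(e for combos in ectsDiv.values() for e in combos))
--     if not order:
--         return {}
--     p0 = periods[0]
--     desc = sorted(order, reverse=True)
--     out = {}
--     for e in order:
--         bound = p0 - e
--         best = next((o for o in desc if o <= bound), None)
--         out[e] = e if best is None else p0 - best
--     return out
-- ===== Notes on version B (the rewrite author's own statement) =====
-- stated objective: faster
-- what changed: B collects the distinct ects values once with dict.fromkeys, sorts them descending once, and answers each per-ects query by taking the first sorted element <= periods[0]-ects (the predecessor), instead of A's per-key full comprehension over all keys followed by min().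
import Mathlib
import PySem

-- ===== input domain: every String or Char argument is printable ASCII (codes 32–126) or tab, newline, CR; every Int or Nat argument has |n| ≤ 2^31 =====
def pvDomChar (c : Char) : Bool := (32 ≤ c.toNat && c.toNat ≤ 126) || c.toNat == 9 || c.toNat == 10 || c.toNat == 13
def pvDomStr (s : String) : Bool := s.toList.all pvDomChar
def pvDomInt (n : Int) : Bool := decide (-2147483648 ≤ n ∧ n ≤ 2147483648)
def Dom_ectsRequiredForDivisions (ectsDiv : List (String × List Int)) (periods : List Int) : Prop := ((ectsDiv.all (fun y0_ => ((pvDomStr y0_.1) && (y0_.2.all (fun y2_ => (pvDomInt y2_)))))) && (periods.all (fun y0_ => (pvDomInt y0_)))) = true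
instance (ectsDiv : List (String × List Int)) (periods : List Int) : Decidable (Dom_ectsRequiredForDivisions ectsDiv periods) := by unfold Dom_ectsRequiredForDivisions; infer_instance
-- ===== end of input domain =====

-- B replaces A's per-key full scan (inner comprehension + min) by one descending sort and a
-- first-match predecessor scan per key; neither version mutates its arguments.

-- ===== PORT A =====
def ectsRequiredForDivisions (ectsDiv : List (String × List Int)) (periods : List Int) : List (Int × Int) :=
  -- ectsSpaces = {}; for combos in ectsDiv.values(): for ects in combos: ectsSpaces[ects] = ects
  let ectsSpaces : PySem.Dict Int Int :=
    ectsDiv.foldl (fun d kv => kv.2.foldl (fun d e => d.insert e e) d) PySem.Dict.empty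
  -- ectses = [int(ects) for ects in ectsSpaces.keys()]  (int() is the identity on Int)
  let ectses : List Int := ectsSpaces.keys
  let final :=
    ectses.foldl (fun d ects =>
      let otherSpace := (PySem.List.pyGet? periods 0).getD 0 - ects   -- periods[0]; none (IndexError) excluded by Pre_
      let lefts := (ectses.filter (fun other => decide (other ≤ otherSpace))).map (fun other => otherSpace - other)
      match PySem.List.min? lefts (fun y => y) with
      | some m => d.insert ects (m + ects)
      | none => d) ectsSpaces
  final.items

-- ===== PORT B =====
def ectsRequiredForDivisions_alt (ectsDiv : List (String × List Int)) (periods : List Int) : List (Int × Int) :=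
  let order : List Int := PySem.List.dedup (ectsDiv.flatMap Prod.snd)   -- dict.fromkeys over the generator
  if order = [] then []
  else
    let p0 := (PySem.List.pyGet? periods 0).getD 0    -- periods[0]; none (IndexError) excluded by Pre_
    let desc := PySem.List.sorted order (fun x => x) true
    let out :=
      order.foldl (fun d e =>
        match desc.find? (fun o => decide (o ≤ p0 - e)) with   -- next((o for o in desc if o <= bound), None)
        | some best => d.insert e (p0 - best)
        | none => d.insert e e) PySem.Dict.empty
    out.items

-- ===== PRECONDITION & SPEC =====
-- Pre_ excludes exactly the inputs where Python A raises IndexError at periods[0]: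
-- some combo is nonempty while periods is empty.
def Pre_ectsRequiredForDivisions (ectsDiv : List (String × List Int)) (periods : List Int) : Prop :=
  periods ≠ [] ∨ ectsDiv.flatMap Prod.snd = []
instance (ectsDiv : List (String × List Int)) (periods : List Int) : Decidable (Pre_ectsRequiredForDivisions ectsDiv periods) := by unfold Pre_ectsRequiredForDivisions; infer_instance

def pvWitness_ectsRequiredForDivisions : (List (String × List Int)) × List Int :=
  ([("a", [3, 5]), ("b", [5, 2])], [10])

def Spec_ectsRequiredForDivisions (ectsDiv : List (String × List Int)) (periods : List Int) (out : List (Int × Int)) : Prop := out = ectsRequiredForDivisions_alt ectsDiv periods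
instance (ectsDiv : List (String × List Int)) (periods : List Int) (out : List (Int × Int)) : Decidable (Spec_ectsRequiredForDivisions ectsDiv periods out) := by unfold Spec_ectsRequiredForDivisions; infer_instance

-- ===== CLAIM (what is proved, stated in full; the proofs are below) =====
def Claim_equal_ectsRequiredForDivisions : Prop := ∀ (ectsDiv : List (String × List Int)) (periods : List Int), Dom_ectsRequiredForDivisions ectsDiv periods → Pre_ectsRequiredForDivisions ectsDiv periods → Spec_ectsRequiredForDivisions ectsDiv periods (ectsRequiredForDivisions ectsDiv periods)

-- ===== LEMMAS AND PROOFS =====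

-- A's conditional update, as a function of the key only (helper for the proof)
def updA (K : List Int) (p0 x : Int) : Option Int :=
  (PySem.List.min? ((K.filter (fun other => decide (other ≤ p0 - x))).map (fun other => p0 - x - other)) (fun y => y)).map (fun m => m + x)

-- B's per-key value (helper for the proof)
def valB (K : List Int) (p0 e : Int) : Int :=
  match (PySem.List.sorted K (fun x => x) true).find? (fun o => decide (o ≤ p0 - e)) with
  | some best => p0 - best
  | none => e

-- nested dict-building fold = fold over the flattened combos
theorem foldl_nested_eq_flatMap {α β : Type} (l : List (α × List β)) (f : PySem.Dict β β → β → PySem.Dict β β) (d : PySem.Dict β β) :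
    l.foldl (fun d kv => kv.2.foldl f d) d = (l.flatMap Prod.snd).foldl f d := by
  induction l generalizing d with
  | nil => rfl
  | cons kv t ih => simp [List.foldl, List.flatMap_cons, List.foldl_append, ih]

-- phase-1 values: every key of the built dict maps to itself
theorem getD_foldl_insert_self (L : List Int) (d : PySem.Dict Int Int) (e : Int) :
    (L.foldl (fun d x => d.insert x x) d).getD e 0 = if e ∈ L then e else d.getD e 0 := by
  induction L generalizing d with
  | nil => simp
  | cons x t ih =>
    simp only [List.foldl, ih, PySem.Dict.getD_insert, List.mem_cons]
    by_cases he : e ∈ t <;> by_cases hex : e = x <;> simp [he, hex]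

-- a conditional-insert loop over keys not equal to e leaves getD at e unchanged
theorem getD_foldl_upd_not_mem (K : List Int) (upd : Int → Option Int) (d : PySem.Dict Int Int) (e : Int) (he : e ∉ K) :
    (K.foldl (fun d x => match upd x with | some w => d.insert x w | none => d) d).getD e 0 = d.getD e 0 := by
  induction K generalizing d with
  | nil => rfl
  | cons x t ih =>
    simp only [List.mem_cons, not_or] at he
    simp only [List.foldl, ih _ he.2]
    cases upd x with
    | none => rfl
    | some w => simp [PySem.Dict.getD_insert, he.1]

-- value at e after the conditional-insert loop over a Nodup list containing e
theorem getD_foldl_upd (K : List Int) (upd : Int → Option Int) (d : PySem.Dict Int Int) (e : Int) (hnd : K.Nodup) (he : e ∈ K) :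
    (K.foldl (fun d x => match upd x with | some w => d.insert x w | none => d) d).getD e 0
      = match upd e with | some w => w | none => d.getD e 0 := by
  induction K generalizing d with
  | nil => simp at he
  | cons x t ih =>
    rcases List.nodup_cons.mp hnd with ⟨hx, hnt⟩
    rcases List.mem_cons.mp he with rfl | het
    · simp only [List.foldl]
      cases hu : upd e with
      | none => exact getD_foldl_upd_not_mem t upd d e hx
      | some w =>
        rw [getD_foldl_upd_not_mem t upd _ e hx]
        simp
    · simp only [List.foldl, ih _ hnt het]
      cases hu : upd x with
      | none => rfl
      | some w =>
        have hne : e ≠ x := fun h => hx (h ▸ het)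
        cases upd e <;> simp [PySem.Dict.getD_insert, hne]

-- the conditional-insert loop does not change the key list when every key is already present
theorem keys_foldl_upd (K : List Int) (upd : Int → Option Int) (d : PySem.Dict Int Int)
    (h : ∀ x ∈ K, d.contains x = true) :
    (K.foldl (fun d x => match upd x with | some w => d.insert x w | none => d) d).keys = d.keys := by
  induction K generalizing d with
  | nil => rfl
  | cons x t ih =>
    have hx := h x (List.mem_cons_self ..)
    have hstep : (match upd x with | some w => d.insert x w | none => d).keys = d.keys := by
      cases upd x with
      | none => rfl
      | some w => exact PySem.Dict.keys_insert_of_contains d w hx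
    simp only [List.foldl]
    rw [ih _ (fun y hy => ?_), hstep]
    have hy' := h y (List.mem_cons_of_mem _ hy)
    cases upd x with
    | none => exact hy'
    | some w =>
      rw [PySem.Dict.contains_iff_mem_keys] at *
      rw [PySem.Dict.keys_insert_of_contains d w (by rw [PySem.Dict.contains_iff_mem_keys]; exact hx)]
      exact hy'

-- on a ≥-sorted list, the first element ≤ b is the maximum element ≤ b
theorem find_desc_max (l : List Int) (hl : l.Pairwise (fun a b => b ≤ a)) (b m : Int)
    (h : l.find? (fun o => decide (o ≤ b)) = some m) :
    m ∈ l ∧ m ≤ b ∧ ∀ y ∈ l, y ≤ b → y ≤ m := by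
  induction l with
  | nil => simp at h
  | cons x t ih =>
    rcases List.pairwise_cons.mp hl with ⟨hxt, hpt⟩
    by_cases hx : x ≤ b
    · rw [List.find?_cons_of_pos (by simpa using hx)] at h
      cases h
      exact ⟨List.mem_cons_self .., hx, fun y hy _ => by
        rcases List.mem_cons.mp hy with rfl | hy'
        · exact le_refl _
        · exact hxt y hy'⟩
    · rw [List.find?_cons_of_neg (by simpa using hx)] at h
      obtain ⟨hm, hmb, hmax⟩ := ih hpt h
      exact ⟨List.mem_cons_of_mem _ hm, hmb, fun y hy hyb => by
        rcases List.mem_cons.mp hy with rfl | hy'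
        · exact absurd hyb hx
        · exact hmax y hy' hyb⟩

-- the per-key value computed by A equals the one computed by B
theorem value_eq (K : List Int) (p0 e : Int) :
    (match PySem.List.min? ((K.filter (fun other => decide (other ≤ p0 - e))).map (fun other => p0 - e - other)) (fun y => y) with
     | some m => m + e
     | none => e)
    = valB K p0 e := by
  unfold valB
  cases hf : (PySem.List.sorted K (fun x => x) true).find? (fun o => decide (o ≤ p0 - e)) with
  | none =>
    have hnone : ∀ o ∈ K, ¬ (o ≤ p0 - e) := by
      intro o ho
      have := List.find?_eq_none.mp hf o ((PySem.List.mem_sorted ..).mpr ho)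
      simpa using this
    have hfilt : K.filter (fun other => decide (other ≤ p0 - e)) = [] := by
      simp only [List.filter_eq_nil_iff]
      intro o ho; simpa using hnone o ho
    rw [hfilt]
    simp [PySem.List.min?]
  | some best =>
    obtain ⟨hmem, hbb, hmax⟩ := find_desc_max _ (PySem.List.sorted_pairwise_rev ..) (p0 - e) best hf
    have hbK : best ∈ K := (PySem.List.mem_sorted ..).mp hmem
    have hbf : best ∈ K.filter (fun other => decide (other ≤ p0 - e)) :=
      List.mem_filter.mpr ⟨hbK, by simpa using hbb⟩
    have hbmap : p0 - e - best ∈ (K.filter (fun other => decide (other ≤ p0 - e))).map (fun other => p0 - e - other) :=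
      List.mem_map.mpr ⟨best, hbf, rfl⟩
    cases hm : PySem.List.min? ((K.filter (fun other => decide (other ≤ p0 - e))).map (fun other => p0 - e - other)) (fun y => y) with
    | none =>
      rw [PySem.List.min?_eq_none_iff] at hm
      simp [hm] at hbmap
    | some m =>
      have hmm := PySem.List.min?_mem hm
      obtain ⟨o, hof, rfl⟩ := List.mem_map.mp hmm
      have hmin := PySem.List.min?_isMin hm (p0 - e - best) hbmap
      rcases List.mem_filter.mp hof with ⟨hoK, hob⟩
      have hob' : o ≤ p0 - e := by simpa using hob
      have h1 : o ≤ best := hmax o ((PySem.List.mem_sorted ..).mpr hoK) hob'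
      have h2 : best ≤ o := by omega
      have ho : o = best := le_antisymm h1 h2
      subst ho
      dsimp only
      ring

-- fresh distinct-key insert loop (B's loop) written as a map
theorem items_foldl_insert_distinct (K : List Int) (v : Int → Int) (hnd : K.Nodup) :
    (K.foldl (fun d e => d.insert e (v e)) (PySem.Dict.empty : PySem.Dict Int Int)).items
      = K.map (fun e => (e, v e)) := by
  have := PySem.Dict.items_foldl_insert_fresh (l := K) (k := fun e => e) (v := v)
    (d := (PySem.Dict.empty : PySem.Dict Int Int)) (fun a _ => by simp) (by simpa using hnd)
  simpa using this

-- ===== VERDICT (by name: the statement is the Claim_ definition above) =====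
theorem ectsRequiredForDivisions_spec : Claim_equal_ectsRequiredForDivisions := by
  intro ectsDiv periods _ _
  simp only [Spec_ectsRequiredForDivisions, ectsRequiredForDivisions, ectsRequiredForDivisions_alt]
  rw [foldl_nested_eq_flatMap]
  generalize (PySem.List.pyGet? periods 0).getD 0 = p0
  generalize ectsDiv.flatMap Prod.snd = L
  have hkeys : (L.foldl (fun d e => d.insert e e) (PySem.Dict.empty : PySem.Dict Int Int)).keys = PySem.List.dedup L := by
    have h := PySem.Dict.keys_foldl_insert L (fun _ x => x) (PySem.Dict.empty : PySem.Dict Int Int)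
    rw [PySem.List.dedup_eq_ofList]
    simpa [PySem.Set.ofList, PySem.Set.update] using h
  have hnd : (PySem.List.dedup L).Nodup := PySem.List.nodup_dedup L
  rw [hkeys]
  by_cases hK : PySem.List.dedup L = []
  · rw [if_pos hK, hK]
    simp only [List.foldl_nil]
    rw [PySem.Dict.items_eq_map_keys _ (by rw [hkeys]; exact hnd) 0, hkeys, hK]
    simp
  · rw [if_neg hK]
    have hstepA : (fun (d : PySem.Dict Int Int) ects =>
        match PySem.List.min? (((PySem.List.dedup L).filter (fun other => decide (other ≤ p0 - ects))).map (fun other => p0 - ects - other)) (fun y => y) with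
        | some m => d.insert ects (m + ects)
        | none => d)
        = (fun (d : PySem.Dict Int Int) x => match updA (PySem.List.dedup L) p0 x with | some w => d.insert x w | none => d) := by
      funext d x
      unfold updA
      cases PySem.List.min? (((PySem.List.dedup L).filter (fun other => decide (other ≤ p0 - x))).map (fun other => p0 - x - other)) (fun y => y) <;> rfl
    have hstepB : (fun (d : PySem.Dict Int Int) e =>
        match (PySem.List.sorted (PySem.List.dedup L) (fun x => x) true).find? (fun o => decide (o ≤ p0 - e)) with
        | some best => d.insert e (p0 - best)
        | none => d.insert e e)
        = (fun (d : PySem.Dict Int Int) e => d.insert e (valB (PySem.List.dedup L) p0 e)) := by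
      funext d e
      unfold valB
      cases (PySem.List.sorted (PySem.List.dedup L) (fun x => x) true).find? (fun o => decide (o ≤ p0 - e)) <;> rfl
    rw [hstepA, hstepB]
    have hcont : ∀ x ∈ PySem.List.dedup L, (L.foldl (fun d e => d.insert e e) (PySem.Dict.empty : PySem.Dict Int Int)).contains x = true := by
      intro x hx
      rw [PySem.Dict.contains_iff_mem_keys, hkeys]
      exact hx
    have hkeysF : ((PySem.List.dedup L).foldl (fun (d : PySem.Dict Int Int) x => match updA (PySem.List.dedup L) p0 x with | some w => d.insert x w | none => d) (L.foldl (fun d e => d.insert e e) PySem.Dict.empty)).keys = PySem.List.dedup L := by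
      rw [keys_foldl_upd _ _ _ hcont, hkeys]
    rw [PySem.Dict.items_eq_map_keys _ (by rw [hkeysF]; exact hnd) 0, hkeysF]
    rw [items_foldl_insert_distinct _ _ hnd]
    apply List.map_congr_left
    intro e he
    rw [getD_foldl_upd _ _ _ _ hnd he]
    rw [getD_foldl_insert_self]
    rw [if_pos ((PySem.List.mem_dedup L e).mp he)]
    have := value_eq (PySem.List.dedup L) p0 e
    rw [← this]
    unfold updA
    cases PySem.List.min? (((PySem.List.dedup L).filter (fun other => decide (other ≤ p0 - e))).map (fun other => p0 - e - other)) (fun y => y) <;> rfl
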